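-- pv_equiv track=rewrite | github.com/timekone/Diophantine_python | Diophantine_0.4.py | Min_m
-- ===== SOURCE A (Python) =====
-- def Min_m(arr):
--     """
--     Choose equation with min m=k*l+r
--     where k - number of positive coefficients, l - negative,
--     r - zeroes
--     :param arr: array of equations
--     :return: equation with min m
--     """
--     m_arr = []  # list with values of m for each equation
--     for vec in arr:
--         k = 0
--         l = 0
--         r = 0
--         for a in vec:
--             if a > 0:
--                 k += 1
--             elif a < 0:
--                 l += 1
--             else:
--                 r += 1
--         m_arr.append(k*l+r)
--     return arr[m_arr.index(min(m_arr))]  # index of min m equals to index of its equation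
-- ===== SOURCE B (Python) =====
-- def Min_m(arr):
--     """
--     Choose equation with min m=k*l+r
--     where k - number of positive coefficients, l - negative,
--     r - zeroes
--     :param arr: array of equations
--     :return: equation with min m
--     """
--     def score(vec):
--         c = {1: 0, -1: 0, 0: 0}
--         for a in vec:
--             c[(a > 0) - (a < 0)] += 1
--         return c[1] * c[-1] + c[0]
--     return sorted(arr, key=score)[0]
-- ===== Notes on version B (the rewrite author's own statement) =====
-- stated objective: alternative
-- what changed: Replaces the build-score-table / min / index / subscript pipeline by a stable sort on the score followed by taking the first element, with the score counted through a sign-keyed dict instead of a three-way branching loop; stability of Python's sort makes the head the first argmin, matching A's index(min(...)).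
-- outside the precondition, e.g. on Min_m([]): A raises ValueError, B raises IndexError
import Mathlib
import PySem

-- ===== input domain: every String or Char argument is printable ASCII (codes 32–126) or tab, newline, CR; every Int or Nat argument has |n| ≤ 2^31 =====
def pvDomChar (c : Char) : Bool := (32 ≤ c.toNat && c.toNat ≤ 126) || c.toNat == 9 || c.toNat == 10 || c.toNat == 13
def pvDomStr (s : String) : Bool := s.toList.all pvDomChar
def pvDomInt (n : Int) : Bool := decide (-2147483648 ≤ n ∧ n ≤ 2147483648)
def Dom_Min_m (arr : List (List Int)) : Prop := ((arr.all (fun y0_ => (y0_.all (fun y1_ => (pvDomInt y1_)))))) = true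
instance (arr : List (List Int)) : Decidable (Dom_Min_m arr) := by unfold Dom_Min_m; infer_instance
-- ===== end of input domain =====

-- B replaces A's build-score-table / min / index / subscript pipeline by a stable sort on the
-- score and taking the head, with the score counted through a sign-keyed dict (alternative).

-- ===== PORT A =====
def Min_m (arr : List (List Int)) : List Int :=
  let m_arr := arr.foldl (fun m_arr vec =>
    let s := vec.foldl (fun (s : Int × Int × Int) a =>
      if a > 0 then (s.1 + 1, s.2.1, s.2.2)
      else if a < 0 then (s.1, s.2.1 + 1, s.2.2)
      else (s.1, s.2.1, s.2.2 + 1)) (0, 0, 0)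
    m_arr ++ [s.1 * s.2.1 + s.2.2]) []
  match PySem.List.min? m_arr (fun x => x) with
  | none => []  -- min([]) raises ValueError; excluded by Pre_Min_m
  | some m =>
    match PySem.List.index? m_arr m with
    | none => []  -- unreachable: the minimum is a member of m_arr
    | some i =>
      match PySem.List.pyGet? arr (i : Int) with
      | none => []  -- unreachable: i < len(arr)
      | some eq => eq

-- ===== PORT B =====
-- (a > 0) - (a < 0) is Python bool arithmetic; ported exactly as the two if-expressions.
def pvScore (vec : List Int) : Int :=
  let c0 := ((PySem.Dict.empty.insert (1 : Int) (0 : Int)).insert (-1) 0).insert 0 0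
  let c := vec.foldl (fun c a =>
    c.modify ((if a > 0 then (1 : Int) else 0) - (if a < 0 then 1 else 0)) 0 (· + 1)) c0
  c.getD 1 0 * c.getD (-1) 0 + c.getD 0 0

def Min_m_alt (arr : List (List Int)) : List Int :=
  match PySem.List.sorted arr pvScore false with
  | [] => []  -- sorted([])[0] raises IndexError; excluded by Pre_Min_m
  | v :: _ => v

-- ===== PRECONDITION & SPEC =====
-- Pre_ excludes only the empty list, on which A's min([]) raises ValueError (B's [0] raises IndexError).
def Pre_Min_m (arr : List (List Int)) : Prop := arr ≠ []
instance (arr : List (List Int)) : Decidable (Pre_Min_m arr) := by unfold Pre_Min_m; infer_instance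
def pvWitness_Min_m : List (List Int) := [[1, -2, 0], [3, 4]]

def Spec_Min_m (arr : List (List Int)) (out : List Int) : Prop := out = Min_m_alt arr
instance (arr : List (List Int)) (out : List Int) : Decidable (Spec_Min_m arr out) := by unfold Spec_Min_m; infer_instance

-- ===== CLAIM (what is proved, stated in full; the proofs are below) =====
def Claim_equal_Min_m : Prop := ∀ (arr : List (List Int)), Dom_Min_m arr → Pre_Min_m arr → Spec_Min_m arr (Min_m arr)

-- ===== LEMMAS AND PROOFS =====

-- The three sign counts partition the length.
theorem tri_count (vec : List Int) :
    vec.countP (fun a => decide (0 < a)) + vec.countP (fun a => decide (a < 0))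
      + vec.countP (fun a => decide (a = 0)) = vec.length := by
  induction vec with
  | nil => simp
  | cons a t ih =>
    simp only [List.countP_cons, List.length_cons]
    rcases lt_trichotomy a 0 with h | h | h
    · have h1 : ¬ 0 < a := by omega
      have h2 : a ≠ 0 := by omega
      simp [h, h1, h2]; omega
    · subst h; simp; omega
    · have h1 : ¬ a < 0 := by omega
      have h2 : a ≠ 0 := by omega
      simp [h, h1, h2]; omega

-- B's sign-dict counting produces the three countP counts.
theorem pvScore_eq (vec : List Int) :
    pvScore vec =
      ((vec.countP (fun a => decide (0 < a)) : Int)) * ((vec.countP (fun a => decide (a < 0)) : Int))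
        + ((vec.length : Int) - (vec.countP (fun a => decide (0 < a)) : Nat)
          - (vec.countP (fun a => decide (a < 0)) : Nat)) := by
  have hmap : ∀ (c : PySem.Dict Int Int),
      vec.foldl (fun c a =>
        c.modify ((if a > 0 then (1 : Int) else 0) - (if a < 0 then 1 else 0)) 0 (· + 1)) c =
      (vec.map (fun a => (if a > 0 then (1 : Int) else 0) - (if a < 0 then 1 else 0))).foldl
        (fun c x => c.modify x 0 (· + 1)) c := by
    intro c; rw [List.foldl_map]
  simp only [pvScore, hmap]
  rw [PySem.Dict.getD_foldl_modify_add_one, PySem.Dict.getD_foldl_modify_add_one,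
      PySem.Dict.getD_foldl_modify_add_one]
  have hc1 : (vec.map (fun a => (if a > 0 then (1 : Int) else 0) - (if a < 0 then 1 else 0))).count 1
      = vec.countP (fun a => decide (0 < a)) := by
    rw [List.count_eq_countP, List.countP_map]
    apply List.countP_congr
    intro a _
    rcases lt_trichotomy a 0 with h | h | h
    · have h1 : ¬ a > 0 := by omega
      simp [h, h1] <;> omega
    · subst h; simp
    · have h1 : ¬ a < 0 := by omega
      simp [h, h1] <;> omega
  have hcm1 : (vec.map (fun a => (if a > 0 then (1 : Int) else 0) - (if a < 0 then 1 else 0))).count (-1)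
      = vec.countP (fun a => decide (a < 0)) := by
    rw [List.count_eq_countP, List.countP_map]
    apply List.countP_congr
    intro a _
    rcases lt_trichotomy a 0 with h | h | h
    · have h1 : ¬ a > 0 := by omega
      simp [h, h1] <;> omega
    · subst h; simp
    · have h1 : ¬ a < 0 := by omega
      simp [h, h1] <;> omega
  have hc0 : (vec.map (fun a => (if a > 0 then (1 : Int) else 0) - (if a < 0 then 1 else 0))).count 0
      = vec.countP (fun a => decide (a = 0)) := by
    rw [List.count_eq_countP, List.countP_map]
    apply List.countP_congr
    intro a _
    rcases lt_trichotomy a 0 with h | h | h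
    · have h1 : ¬ a > 0 := by omega
      simp [h, h1] <;> omega
    · subst h; simp
    · have h1 : ¬ a < 0 := by omega
      simp [h, h1] <;> omega
  rw [hc1, hcm1, hc0]
  have htri := tri_count vec
  have hg1 : (((PySem.Dict.empty.insert (1 : Int) (0 : Int)).insert (-1) 0).insert 0 0).getD 1 0 = 0 := by decide
  have hgm1 : (((PySem.Dict.empty.insert (1 : Int) (0 : Int)).insert (-1) 0).insert 0 0).getD (-1) 0 = 0 := by decide
  have hg0 : (((PySem.Dict.empty.insert (1 : Int) (0 : Int)).insert (-1) 0).insert 0 0).getD 0 0 = 0 := by decide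
  rw [hg1, hgm1, hg0]
  simp only [zero_add]
  push_cast
  omega

-- A's inner counting loop, from any start state, adds the two filtered counts and the rest.
theorem rowFold (vec : List Int) : ∀ (k l r : Int),
    (vec.foldl (fun (s : Int × Int × Int) a =>
      if a > 0 then (s.1 + 1, s.2.1, s.2.2)
      else if a < 0 then (s.1, s.2.1 + 1, s.2.2)
      else (s.1, s.2.1, s.2.2 + 1)) (k, l, r)) =
    (k + (vec.countP (fun a => decide (0 < a)) : Nat),
     l + (vec.countP (fun a => decide (a < 0)) : Nat),
     r + ((vec.length : Int) - (vec.countP (fun a => decide (0 < a)) : Nat)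
       - (vec.countP (fun a => decide (a < 0)) : Nat))) := by
  induction vec with
  | nil => simp
  | cons a t ih =>
    intro k l r
    rcases lt_trichotomy a 0 with h | h | h
    · have h1 : ¬ a > 0 := by omega
      simp only [List.foldl_cons, if_neg h1, if_pos h, ih, List.countP_cons, List.length_cons,
        Prod.mk.injEq]
      simp [h, h1]
      omega
    · subst h
      simp only [List.foldl_cons, if_neg (by omega : ¬ (0:Int) > 0),
        ih, List.countP_cons, List.length_cons, Prod.mk.injEq]
      simp
      omega
    · simp only [List.foldl_cons, if_pos h, ih, List.countP_cons, List.length_cons, Prod.mk.injEq]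
      simp [h]
      omega

-- Python's min on a nonempty list is the running strict-< fold from the head.
theorem min?_cons {α : Type} (f : α → Int) :
    ∀ (t : List α) (x : α), PySem.List.min? (x :: t) f =
      some (t.foldl (fun m y => if f y < f m then y else m) x) := by
  intro t
  induction t with
  | nil => intro x; rfl
  | cons y t ih =>
    intro x
    have h1 : PySem.List.min? (x :: y :: t) f =
        PySem.List.min? ((if f y < f x then y else x) :: t) f := by
      by_cases hc : f y < f x <;> simp [PySem.List.min?, hc]
    rw [h1, ih, List.foldl_cons]

-- The head of the stable insertion sort is the same running strict-< fold.
theorem head?_foldl_insertBy {α : Type} (key : α → Int) :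
    ∀ (t : List α) (m : α) (acc : List α), acc.head? = some m →
      ((t.foldl (fun acc x => PySem.List.insertBy (fun a b => decide (key a < key b)) x acc) acc).head?
        = some (t.foldl (fun m y => if key y < key m then y else m) m)) := by
  intro t
  induction t with
  | nil => intro m acc h; simpa using h
  | cons y t ih =>
    intro m acc h
    match acc, h with
    | a :: as, h =>
      have ha : a = m := by simpa using h
      subst ha
      simp only [List.foldl_cons]
      by_cases hc : key y < key a
      · rw [if_pos hc]
        exact ih y _ (by simp [PySem.List.insertBy, hc])
      · rw [if_neg hc]
        exact ih a _ (by simp [PySem.List.insertBy, hc])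

theorem head?_sorted {α : Type} (key : α → Int) (arr : List α) (h : arr ≠ []) :
    (PySem.List.sorted arr key false).head? = PySem.List.min? arr key := by
  match arr with
  | [] => exact absurd rfl h
  | x :: t =>
    rw [PySem.List.sorted_eq_foldl_insertBy, List.foldl_cons, min?_cons key t x]
    exact head?_foldl_insertBy key t x _ (by simp [PySem.List.insertBy])

-- The running fold lands on the FIRST argmin: strictly below every earlier key, ≤ every key.
theorem foldl_first_argmin {α : Type} (f : α → Int) :
    ∀ (t : List α) (x : α),
    ∃ i, ∃ hi : i < (x::t).length,
      t.foldl (fun m y => if f y < f m then y else m) x = (x::t)[i] ∧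
      (∀ j (hj : j < i), f ((x::t)[i]'hi) < f ((x::t)[j]'(by omega))) ∧
      (∀ j (hj : j < (x::t).length), f ((x::t)[i]'hi) ≤ f ((x::t)[j]'hj)) := by
  intro t
  induction t with
  | nil =>
    intro x
    refine ⟨0, by simp, by simp, by omega, ?_⟩
    intro j hj
    simp only [List.length_cons, List.length_nil] at hj
    have : j = 0 := by omega
    subst this
    simp
  | cons y t ih =>
    intro x
    simp only [List.foldl_cons]
    by_cases hxy : f y < f x
    · rw [if_pos hxy]
      obtain ⟨i, hi, heq, hstrict, hle⟩ := ih y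
      refine ⟨i + 1, by simpa using Nat.succ_lt_succ hi, by simpa using heq, ?_, ?_⟩
      · intro j hj
        match j with
        | 0 =>
          simp only [List.getElem_cons_succ, List.getElem_cons_zero]
          calc f ((y::t)[i]) ≤ f y := hle 0 (by omega)
            _ < f x := hxy
        | j + 1 =>
          simpa using hstrict j (by omega)
      · intro j hj
        match j with
        | 0 =>
          simp only [List.getElem_cons_succ, List.getElem_cons_zero]
          calc f ((y::t)[i]) ≤ f y := hle 0 (by omega)
            _ ≤ f x := le_of_lt hxy
        | j + 1 =>
          simpa using hle j (by simpa using Nat.lt_of_succ_lt_succ hj)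
    · rw [if_neg hxy]
      obtain ⟨i, hi, heq, hstrict, hle⟩ := ih x
      match i, hi with
      | 0, hi =>
        refine ⟨0, by simp, by simpa using heq, by omega, ?_⟩
        intro j hj
        match j with
        | 0 => simp
        | 1 =>
          simp only [List.getElem_cons_zero, List.getElem_cons_succ]
          omega
        | j + 2 =>
          simp only [List.getElem_cons_zero, List.getElem_cons_succ]
          have := hle (j+1) (by simp at hj ⊢; omega)
          simpa using this
      | i + 1, hi =>
        refine ⟨i + 2, by simp at hi ⊢; omega, by simpa using heq, ?_, ?_⟩
        · intro j hj
          match j with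
          | 0 =>
            have := hstrict 0 (by omega)
            simpa using this
          | 1 =>
            have h0 := hstrict 0 (by omega)
            simp only [List.getElem_cons_succ, List.getElem_cons_zero] at h0 ⊢
            omega
          | j + 2 =>
            have := hstrict (j+1) (by omega)
            simpa using this
        · intro j hj
          match j with
          | 0 =>
            have := hstrict 0 (by omega)
            simp only [List.getElem_cons_succ, List.getElem_cons_zero] at this ⊢
            omega
          | 1 =>
            have h0 := hstrict 0 (by omega)
            simp only [List.getElem_cons_succ, List.getElem_cons_zero] at h0 ⊢
            omega
          | j + 2 =>
            have := hle (j+1) (by simp at hj ⊢; omega)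
            simpa using this

theorem min?_first_argmin {α : Type} (f : α → Int) (arr : List α) (h : arr ≠ []) :
    ∃ i, ∃ hi : i < arr.length, PySem.List.min? arr f = some arr[i] ∧
      (∀ j (hj : j < i), f arr[i] < f (arr[j]'(by omega))) ∧
      (∀ j (hj : j < arr.length), f arr[i] ≤ f arr[j]) := by
  match arr with
  | [] => exact absurd rfl h
  | x :: t =>
    obtain ⟨i, hi, heq, hstrict, hle⟩ := foldl_first_argmin f t x
    exact ⟨i, hi, by rw [min?_cons f t x, heq], hstrict, hle⟩

-- A's table-building loop is the list of B's scores.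
theorem m_arr_eq (arr : List (List Int)) :
    arr.foldl (fun m_arr vec =>
      let s := vec.foldl (fun (s : Int × Int × Int) a =>
        if a > 0 then (s.1 + 1, s.2.1, s.2.2)
        else if a < 0 then (s.1, s.2.1 + 1, s.2.2)
        else (s.1, s.2.1, s.2.2 + 1)) (0, 0, 0)
      m_arr ++ [s.1 * s.2.1 + s.2.2]) [] = arr.map pvScore := by
  have hbody : (fun (m_arr : List Int) (vec : List Int) =>
      let s := vec.foldl (fun (s : Int × Int × Int) a =>
        if a > 0 then (s.1 + 1, s.2.1, s.2.2)
        else if a < 0 then (s.1, s.2.1 + 1, s.2.2)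
        else (s.1, s.2.1, s.2.2 + 1)) (0, 0, 0)
      m_arr ++ [s.1 * s.2.1 + s.2.2]) = fun m_arr vec => m_arr ++ [pvScore vec] := by
    funext m_arr vec
    simp only [rowFold vec 0 0 0, pvScore_eq]
    ring_nf
  rw [hbody, PySem.List.foldl_append_singleton_eq_map]
  simp

theorem Min_m_eq_alt (arr : List (List Int)) (h : arr ≠ []) : Min_m arr = Min_m_alt arr := by
  obtain ⟨i, hi, heq, hstrict, hle⟩ := min?_first_argmin pvScore arr h
  have halt : Min_m_alt arr = arr[i] := by
    have hs := head?_sorted pvScore arr h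
    rw [heq] at hs
    cases hsort : PySem.List.sorted arr pvScore false with
    | nil => exact absurd ((PySem.List.sorted_eq_nil_iff _ _ _).1 hsort) h
    | cons v t =>
      rw [hsort] at hs
      simp only [List.head?_cons, Option.some.injEq] at hs
      simp [Min_m_alt, hsort, hs]
  rw [halt]
  simp only [Min_m]
  rw [m_arr_eq]
  have hne : arr.map pvScore ≠ [] := by simpa using h
  have hmin : PySem.List.min? (arr.map pvScore) (fun x => x) = some (pvScore arr[i]) := by
    cases hm : PySem.List.min? (arr.map pvScore) (fun x => x) with
    | none => exact absurd ((PySem.List.min?_eq_none_iff _ _).1 hm) hne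
    | some m =>
      have hmem := PySem.List.min?_mem hm
      obtain ⟨v, hv, rfl⟩ := List.mem_map.1 hmem
      obtain ⟨j, hj, rfl⟩ := List.mem_iff_getElem.1 hv
      have h1 : pvScore arr[i] ≤ pvScore arr[j] := hle j hj
      have h2 : pvScore arr[j] ≤ pvScore arr[i] :=
        PySem.List.min?_isMin hm _ (List.mem_map.2 ⟨arr[i], List.getElem_mem hi, rfl⟩)
      rw [le_antisymm h2 h1]
  have hidx : List.idxOf? (pvScore arr[i]) (arr.map pvScore) = some i := by
    rw [List.idxOf?_eq_some_iff]
    refine ⟨by simpa using hi, by simp, ?_⟩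
    intro j hj
    have := hstrict j hj
    simp only [List.getElem_map]
    omega
  have hget : arr[i]? = some arr[i] := List.getElem?_eq_getElem hi
  rw [hmin]
  simp [hidx, hget]

-- ===== VERDICT (by name: the statement is the Claim_ definition above) =====
theorem Min_m_spec : Claim_equal_Min_m := by
  intro arr _ hpre
  exact Min_m_eq_alt arr hpre
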